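/- GENERATED by tools/from_farm_form.py from prooffarm-gif/accepted/DGifDecreaseImageCounter.3/Lemmas.lean (a worked proof of the farm's unit `DGifDecreaseImageCounter.3`,
   accepted by the verdict) — do not edit. -/
import Gif.Spec.Units.DGifDecreaseImageCounter_3
import Gif.Spec.AllSegs

/-!
  Lemmas for the unit `DGifDecreaseImageCounter.3` (0x10a4f2 … 0x10a531 and 0x10a538 … 0x10a56f; dgif_lib.c:1166-1178): the segment
  from CUT 2 (`AfterMap`: the dropped slot's raster and colour map are freed, `ImageCount` is decremented) to CUT 3 (`Done`).

      entry ─ check ─ load gif.ImageCount ─ test ─┬─ (= 0) ─ check ─ load gif.SavedImages ─ free ─ check ─ store NULL ─ check ─ store 0 ─┐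
                                                  └─ (> 0) ─ check ─ load gif.SavedImages ─ reallocarray ─ (≠ NULL) check ─ store ───────┴─ CUT 3

  The branch is decided by the ghost list `init` (the count is `init.length`), so the segment is walked in TWO lemmas, one per arm;
  in each the other arm is refuted from the branch fact:

      dc3_empty    `init = []`: `free(gif.SavedImages)` (heap `Hc.release arr`), NULL and 0 stored: the forest with `saved := none`
      dc3_shrink   `init ≠ []`: `reallocarray(gif.SavedImages, init.length, 56)`. A SHRINK IS ALWAYS IN PLACE for this heap
                   (`r16 (56 · init.length) ≤ r16 (56 · cap) ≤ capacity`: `HeapOK.capOK`), so `rax = arr ≠ 0`: the NULL arm and the moved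
                   arm of the contract are vacuous here; the heap is `Hc.resize arr (init.length · 56)`, the same address is stored:
                   the forest with the array `⟨arr, init.length, init⟩`

  and two frame lemmas for the store to `gif.SavedImages` in the resized heap (`dc3_struct_off`, `dc3_saved_kept`).
-/

open X86 X86.User Asan ProgX.Base ProgX.Base.Spec Gif.Spec

set_option maxRecDepth 4000
set_option maxHeartbeats 4000000

namespace Gif.Spec.DGifDecreaseImageCounter_3

/-- **Where a structural window of the forest is**: inside the used part of the heap's region, below the shadow, and 64 bytes
away from the gif object (it is a prefix of another object of the heap). For the frame argument of the store to
`gif.SavedImages` in a heap whose array object has just been resized (`Placed` survives the resize, `Owns` of the old list does not). -/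
theorem dc3_struct_off {H : Heap} {F : Forest} {R : Rd} {mem mem0 : Mem} (hs : Shape F R mem0) (hp : Placed H F.owned)
    (hok : HeapOK H mem) {o : Nat × Nat} (hin : o ∈ F.structs) :
    H.base + 64 ≤ o.1 ∧ o.1 + o.2 + 32 ≤ 0xC00000 ∧ (o.1 + o.2 + 64 ≤ F.gif ∨ F.gif + 120 + 64 ≤ o.1) := by
  obtain ⟨n, hn, hle⟩ := hs.structs_owned o hin
  obtain ⟨x, hx, hxb, hxc⟩ := hp.at_ _ hn
  obtain ⟨xg, hxg, hgb, hgc⟩ := hp.at_ (F.gif, 120) List.mem_cons_self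
  have hne := (hp.structs_ne.1 o hin).1
  have h1 := hok.obj_range hx
  have h2 := hok.obj_inside hx
  have h3 := hok.apart_of_base_ne hx hxg (by
    rw [hxb, hgb]
    exact hne)
  simp only at hxb hxc hgb hgc
  omega

/-- **The SavedImages component through a store to `gif.SavedImages` and a window of the stack**: every counted slot and every
image's structural part is as it was (the pointer / count PAIR is still read in the old memory: the caller reads the new one). -/
theorem dc3_saved_kept {H : Heap} {F : Forest} {R : Rd} {mem mem' : Mem} (hs : Shape F R mem) (hp : Placed H F.owned)
    (hok : HeapOK H mem) (hb : H.base = 0x800000) {w : Span} (hw : w.hi ≤ 0x800000)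
    (hse : Mem.SameExcept [w, ⟨F.gif + 72, F.gif + 80⟩] mem mem') :
    SavedAt F.saved (GifFileType.SavedImages mem F.gif) (GifFileType.ImageCount mem F.gif) mem' := by
  apply hs.saved.frame
  · intro o ho
    have hoff := dc3_struct_off hs hp hok (carry_mem_structs_saved ho)
    apply hse.eqOn
    intro w' hw'
    simp only [List.mem_cons, List.not_mem_nil, or_false] at hw'
    rcases hw' with rfl | rfl
    · right
      omega
    · simp only
      omega
  · intro o ho
    have hoff := dc3_struct_off hs hp hok (carry_mem_structs_saved ho)
    omega

/-- **10A4F2H … 10A531H, the arm `ImageCount > 0`** (`init ≠ []`; dgif_lib.c:1166, 1174-1178): the checked load of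
`gif.ImageCount` (`init.length ≥ 1`: `jle` not taken), the checked load of `gif.SavedImages`,
`reallocarray(gif.SavedImages, init.length, 56)`: IN PLACE (a shrink: `r16 (init.length · 56) ≤ ca`), so `rax = s.arr ≠ 0` and the heap is
`Hc.resize s.arr (init.length · 56)`; the checked store of the same address: `Done` for the forest with the array
`⟨s.arr, init.length, init⟩`. The contract of `reallocarray` is taken for every `(n, c)`: the capacity `ca` comes from `Hc.Live`. -/
theorem dc3_shrink (Lay : Layout) (hLay : Lay.hi = 0x1000000) (μ : Microarch) (hμ : UserX.MicroOK μ) (u₀ : State)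
    (hcode : HasCodeNat Lay u₀ Gif.L.DGifDecreaseImageCounter.entry Gif.Code.code_DGifDecreaseImageCounter.nat Gif.L.DGifDecreaseImageCounter.size)
    (h_load4 : Asan.SmallCheck Lay μ ProgX.Base.WayInv (ProgX.Base.CodeOK u₀) [.rax, .rcx, .rdx] 4 ProgX.Base.L.__asan_load4_noabort.entry)
    (h_load8 : Asan.SmallCheck Lay μ ProgX.Base.WayInv (ProgX.Base.CodeOK u₀) [.rax, .rcx, .rdx] 8 ProgX.Base.L.__asan_load8_noabort.entry)
    (h_store8 : Asan.SmallCheck Lay μ ProgX.Base.WayInv (ProgX.Base.CodeOK u₀) [.rax, .rcx, .rdx] 8 ProgX.Base.L.__asan_store8_noabort.entry)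
    (H : Heap) (rest : List Obj) (frames : List (Nat × FrameLayout)) (F : Forest) (R : Rd) (init : List Img) (g : Img)
    (s : Saved) (Hc : Heap) (e : State) (ret : Word) (hlen : 1 ≤ init.length)
    (h_realloc_all : ∀ (n c : Nat), Calls Lay μ ProgX.Base.WayInv (ProgX.Base.conv u₀) Gif.L.openbsd_reallocarray.entry
      (Gif.Spec.openbsd_reallocarray.spec Hc rest frames n c))
    (v : State) (hat : DGifDecreaseImageCounter.AfterMap H rest frames F R init g s Hc u₀ e ret v) :
    ReachVia Lay μ ProgX.Base.WayInv v
      (fun w => ∃ Hc' Fc', DGifDecreaseImageCounter.Done H rest frames F R init g Hc' Fc' u₀ e ret w) := by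
  have he := hat.entry
  v_entry he
  obtain ⟨henv, hrdi, himgs, hgext⟩ := hat.pre
  have w_rip := hat.rip
  have c_rsp : v.reg .rsp = e.reg .rsp - 24 := hat.rsp
  have c_rbx : v.reg .rbx = e.reg .rdi := hat.rbx
  have w_kept : RegsKept [.rsp] v v := RegsKept.refl _ _
  have w_eq : Mem.EqOn ProgX.Base.L.textLo ProgX.Base.L.textHi u₀.mem v.mem := ProgX.Base.conv_code_eqOn hat.code
  have hdf := (show abiInv _ from hat.abi).1
  have hmx := (show abiInv _ from hat.abi).2
  have hsse := ProgX.Base.sseOK_of_abiInv hat.abi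
  have k_rbp : v.mem.readLE (e.reg .rsp - 8) 8 = (e.reg .rbp).toNat := hat.slot_rbp
  have k_rbx : v.mem.readLE (e.reg .rsp - 16) 8 = (e.reg .rbx).toNat := hat.slot_rbx
  have k_ra : UInt64.ofNat (v.mem.readLE (e.reg .rsp) 8) = ret := hat.slot_ra
  have hsame : Mem.SameExcept
    [⟨(e.reg .rsp).toNat - 176, (e.reg .rsp).toNat⟩,
     ⟨0x800000, 0x1000020⟩] e.mem v.mem := hat.same
  have hok := hat.ok
  have hinv := hat.inv
  have hcur := henv.ctx.cursor_range henv.heap.inv.shadow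
  have hbase : Hc.base = 0x800000 := hat.region.1.trans henv.heap.base
  have hlimit : Hc.limit = 0xC00000 := hat.region.2.trans henv.heap.limit
  -- gif
  have hgin := hok.owns.inside hinv.heap (o := (F.gif, 120)) List.mem_cons_self
  simp only at hgin
  rw [hbase] at hgin
  have hg1 := hgin.1
  have hg2 := hgin.2.2.2.2
  clear hgin
  -- the array
  have hsv := hok.shape.saved
  have hsvd : (DGifDecreaseImageCounter.dropped F s init).saved = some { s with imgs := init } := rfl
  have hgifd : (DGifDecreaseImageCounter.dropped F s init).gif = F.gif := rfl
  rw [hsvd, hgifd] at hsv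
  obtain ⟨harr, hcnt, hlen_cap, hcap1, himgs_at⟩ := hsv
  simp only at hcap1 hlen_cap harr hcnt
  have harr' := harr
  have hcnt' := hcnt
  simp only [gfield] at harr hcnt
  have hmem_arr : (s.arr, 56 * s.cap) ∈ (DGifDecreaseImageCounter.dropped F s init).owned := by
    apply (DGifDecreaseImageCounter.dropped F s init).owned_saved.symm.subset
    rw [hsvd]
    exact List.mem_append_left _ List.mem_cons_self
  have hain := hok.owns.inside hinv.heap hmem_arr
  simp only at hain
  rw [hbase] at hain
  have ha1 := hain.1
  have ha2 := hain.2.2.2.2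
  clear hain
  have hglive : Hc.Live F.gif 120 := hok.gif_live
  have halive : Hc.Live s.arr (56 * s.cap) := hok.owns.live _ hmem_arr
  -- the capacity of the array's chunk, and the callee's contract for it
  obtain ⟨ca, hlca⟩ := halive
  have h_realloc := h_realloc_all (56 * s.cap) ca
  have l_cnt : v.mem.readLE (e.reg .rdi + 0x20) 4 = init.length := by
    rw [rd_eq_readLE v.mem _ (F.gif + 32) 4 (by u_omega)]
    exact hcnt
  have l_arr : v.mem.readLE (e.reg .rdi + 0x48) 8 = s.arr := by
    rw [rd_eq_readLE v.mem _ (F.gif + 72) 8 (by u_omega)]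
    exact harr
  have hgl : LiveIn (Hc.liveObjs ++ rest) frames F.gif 120 := hglive.liveIn rest frames (Nat.le_refl _) (Nat.le_refl _)
  -- the count is a small positive `int`
  have hlt31 : init.length < 2 ^ 31 := by omega
  have hbvn : (BitVec.ofNat 32 init.length).toNat = init.length := by
    rw [BitVec.toNat_ofNat]
    omega
  have hrsi : Word.ofBV (BitVec.signExtend 64 (BitVec.ofNat 32 init.length)) = UInt64.ofNat init.length := by
    rw [sext32_bv _ (by omega), hbvn]
  have hmsb : (BitVec.ofNat 32 init.length).msb = false := bv32_msb_false _ (by omega)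
  have hdead : ¬ (init.length % 4294967296 = 0 ∨ (BitVec.ofNat 32 init.length).msb = true) := by
    rw [hmsb]
    intro h
    rcases h with h | h
    · omega
    · exact absurd h (by decide)
  -- where the bump pointer is
  have hroom := hinv.heap.room
  have hnx : Hc.next = 0x800000 + 32 + Hc.used + 32 := by
    rw [Heap.next_def, hbase]
  have hused : 0x800000 + 32 + Hc.used ≤ 0xC00000 := by
    rw [← hbase, ← hlimit]
    exact hroom
  have hcain := hinv.heap.obj_inside hlca
  simp only at hcain
  have hca2 := hcain.2.2.2
  clear hcain
  -- gif and the array are different objects of the heap, 64 bytes apart; both lie below the bump pointer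
  have hperm : (DGifDecreaseImageCounter.dropped F s init).owned.Perm
      ((s.arr, 56 * s.cap) :: (init.flatMap Img.objs ++ F.ownedButSaved)) :=
    (DGifDecreaseImageCounter.dropped F s init).owned_saved
  have hown0 := hok.owns.perm hperm
  have hgne : s.arr ≠ F.gif :=
    hown0.of_cons.2.2 (F.gif, 120) (List.mem_append_right _ List.mem_cons_self)
  obtain ⟨cg, hlcg⟩ := hglive
  have hcg := hinv.heap.size_le_cap hlcg
  have hgnext := hinv.heap.next_above hlcg
  have hanext := hinv.heap.next_above hlca
  have hfar := hinv.heap.apart_of_base_ne hlcg hlca (Ne.symm hgne)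
  simp only at hcg hgnext hanext hfar
  have hglive : Hc.Live F.gif 120 := ⟨cg, hlcg⟩
  u_walk hcode [hμ.vendor, hrsi] until [Gif.L.DGifDecreaseImageCounter.ret11] span [ProgX.Base.L.textLo, ProgX.Base.L.textHi] side (v_side)
  case check_10a4f6 =>
    -- 0x10a4f6 (dgif_lib.c:1166): the load of `gif.ImageCount` lies inside the live gif object
    have hun : ShadowUntouched v.mem s_10a4f6.mem := by v_untouched
    exact hgl.accSmall hinv.shadow hun _ 4 (by decide) (by u_omega) (by u_omega)
  case check_10a53f =>
    -- the arm `ImageCount <= 0` is dead: the count is `init.length ≥ 1`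
    exact absurd hbr_10a500 hdead
  case check_10a506 =>
    -- 0x10a506 (dgif_lib.c:1175): the load of `gif.SavedImages`
    have hun : ShadowUntouched v.mem s_10a506.mem := by v_untouched
    exact hgl.accSmall hinv.shadow hun _ 8 (by decide) (by u_omega) (by u_omega)
  case call_inv =>
    v_inv
  case pre_10a517 =>
    -- 0x10a517 (dgif_lib.c:1174) `reallocarray(gif.SavedImages, ImageCount, 56)`: the heap's invariant over the pushed return
    -- address; the factors `1 ≤ init.length < 2^31` and 56; the array is live with capacity `ca`
    have e_rsp : (s_10a517.reg .rsp).toNat + 8 = (e.reg .rsp).toNat - 24 := by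
      rw [w_rsp]
      u_omega
    refine ⟨⟨?_, hbase, hlimit, henv.heap.text, henv.heap.offText⟩, ?_, ?_, ?_, ?_, Or.inr ?_⟩
    · rw [e_rsp, w_mem]
      exact hinv.writeLE_out _ _ _ (by u_omega) (by rw [hbase]; left; u_omega) (by left; u_omega)
    · rw [w_rsi, toNat_ofNat_addr init.length (by omega)]
      exact hlen
    · rw [w_rsi, toNat_ofNat_addr init.length (by omega)]
      omega
    · rw [w_rdx]
      decide
    · rw [w_rdx]
      decide
    · rw [w_rdi, toNat_ofNat_addr s.arr (by omega)]
      exact hlca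
  · exact absurd hbr_10a500 hdead
  -- 0x10a51c (ret11): `reallocarray` has returned. A SHRINK IS ALWAYS IN PLACE: `r16 (56 · init.length) ≤ r16 (56 · cap) ≤ ca`
  have ha64 : (UInt64.ofNat s.arr).toNat = s.arr := toNat_ofNat_addr s.arr (by omega)
  have hn64 : (UInt64.ofNat init.length).toNat = init.length := toNat_ofNat_addr init.length (by omega)
  have h56 : (Word.ofBV 56#32).toNat = 56 := by decide
  have hne1 : (s_10a517.reg .rdi).toNat ≠ 0 := by
    rw [w_rdi_10a517, ha64]
    omega
  have hpost := w_post.2 hne1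
  rw [w_rdi_10a517, ha64, w_rsi_10a517, hn64, w_rdx_10a517, h56] at hpost
  clear w_post
  have hfit : r16 (init.length * 56) ≤ ca := by
    have h1 := (hinv.heap.capOK _ hlca).1
    have h2 : r16 (init.length * 56) ≤ r16 (56 * s.cap) := r16_mono (by omega)
    simp only at h1
    omega
  obtain ⟨hrax, hinv1, hkeep⟩ := hpost.1 hfit
  clear hpost
  have e8 : (s_10a517.reg .rsp).toNat + 8 = (e.reg .rsp).toNat - 24 := by
    rw [w_rsp_10a517]
    u_omega
  rw [e8] at hinv1
  have c_rax : s_10a517r.reg .rax = UInt64.ofNat s.arr := by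
    apply UInt64.toNat_inj.mp
    rw [hrax, ha64]
  v_after_call w_rsp_10a517 w_mem_10a517
  simp only [shadowSpan, w_rdi_10a517, ha64, w_rsi_10a517, hn64, w_rdx_10a517, h56] at w_same
  have hpbp : s_10a517.mem.readLE (e.reg .rsp - 8) 8 = (e.reg .rbp).toNat := by
    rw [w_mem_10a517]
    u_frame k_rbp
  rw [w_mem_10a517] at hpbp
  have hsbp : s_10a517r.mem.readLE (e.reg .rsp - 8) 8 = (e.reg .rbp).toNat := by u_frame hpbp
  have hpbx : s_10a517.mem.readLE (e.reg .rsp - 16) 8 = (e.reg .rbx).toNat := by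
    rw [w_mem_10a517]
    u_frame k_rbx
  rw [w_mem_10a517] at hpbx
  have hsbx : s_10a517r.mem.readLE (e.reg .rsp - 16) 8 = (e.reg .rbx).toNat := by u_frame hpbx
  have hpra : UInt64.ofNat (s_10a517.mem.readLE (e.reg .rsp) 8) = ret := by
    rw [w_mem_10a517]
    u_frame k_ra
  rw [w_mem_10a517] at hpra
  have hsra : UInt64.ofNat (s_10a517r.mem.readLE (e.reg .rsp) 8) = ret := by u_frame hpra
  -- the two fields of gif through the callee's footprint
  have hpcnt : s_10a517.mem.readLE (e.reg .rdi + 32) 4 = init.length := by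
    rw [w_mem_10a517]
    u_frame l_cnt
  rw [w_mem_10a517] at hpcnt
  have hscnt : s_10a517r.mem.readLE (e.reg .rdi + 32) 4 = init.length := by u_frame hpcnt
  have hs1 : Mem.SameExcept
    [⟨(e.reg .rsp).toNat - 176, (e.reg .rsp).toNat - 24⟩,
     ⟨0x800000, 0x800008⟩,
     ⟨Hc.next - 32, Hc.next - 8⟩,
     ⟨0xC00000 + Hc.next / 8, 0xC00000 + (Hc.next + init.length * 56 + 7) / 8⟩,
     ⟨Hc.next, Hc.next + init.length * 56⟩,
     ⟨s.arr - 32, s.arr - 16⟩,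
     ⟨0xC00000 + s.arr / 8, 0xC00000 + (s.arr + ca + 7) / 8⟩] v.mem s_10a517r.mem := by u_same
  -- what is owned after the in-place shrink: the array with its new size, everything else as it was
  have hown1 : Owns (Hc.resize s.arr (init.length * 56))
      ((s.arr, init.length * 56) :: (init.flatMap Img.objs ++ F.ownedButSaved)) := hown0.resize_head _
  have hglive1 : (Hc.resize s.arr (init.length * 56)).Live F.gif 120 := hglive.resize_ne (Ne.symm hgne) _
  have hgl1 : LiveIn ((Hc.resize s.arr (init.length * 56)).liveObjs ++ rest) frames F.gif 120 :=
    hglive1.liveIn rest frames (Nat.le_refl _) (Nat.le_refl _)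
  u_walk hcode [hμ.vendor] until [Gif.L.DGifDecreaseImageCounter.at_10a531] span [ProgX.Base.L.textLo, ProgX.Base.L.textHi] side (v_side)
  case check_10a528 =>
    -- 0x10a528 (dgif_lib.c:1177): the store of the (same) address to `gif.SavedImages`: gif is live in the resized heap
    have hun : ShadowUntouched s_10a517r.mem s_10a528.mem := by v_untouched
    exact hgl1.accSmall hinv1.shadow hun _ 8 (by decide) (by u_omega) (by u_omega)
  -- 0x10a531 (CUT 3, dgif_lib.c:1179): THE EXIT ASSERTION, for the resized heap and the forest with the array `⟨arr, init.length, init⟩`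
  clear he_align
  have hbase1 : (Hc.resize s.arr (init.length * 56)).base = 0x800000 := hbase
  have hfbp : s_10a52d.mem.readLE (e.reg .rsp - 8) 8 = (e.reg .rbp).toNat := by
    rw [w_mem]
    u_frame hsbp
  have hfbx : s_10a52d.mem.readLE (e.reg .rsp - 16) 8 = (e.reg .rbx).toNat := by
    rw [w_mem]
    u_frame hsbx
  have hfra : UInt64.ofNat (s_10a52d.mem.readLE (e.reg .rsp) 8) = ret := by
    rw [w_mem]
    u_frame hsra
  have hfcnt : s_10a52d.mem.readLE (e.reg .rdi + 32) 4 = init.length := by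
    rw [w_mem]
    u_frame hscnt
  have hsamef : Mem.SameExcept
    [⟨(e.reg .rsp).toNat - 176, (e.reg .rsp).toNat⟩,
     ⟨0x800000, 0x1000020⟩] e.mem s_10a52d.mem := by
    rw [w_mem]
    u_same
  -- the footprint of the last two stores
  have hs2 : Mem.SameExcept
    [⟨(e.reg .rsp).toNat - 176, (e.reg .rsp).toNat - 24⟩,
     ⟨F.gif + 72, F.gif + 80⟩] s_10a517r.mem s_10a52d.mem := by
    rw [w_mem]
    u_same
  -- the heap's invariant: a return address on the stack, a store into the live gif
  have hinvf : HeapInv (Hc.resize s.arr (init.length * 56)) rest frames ((e.reg .rsp).toNat - 24) s_10a52d.mem := by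
    rw [w_mem]
    refine (hinv1.writeLE_out _ _ _ ?_ ?_ ?_).writeLE_live hglive1 _ _ _ ?_ ?_
    · u_omega
    · rw [hbase1]
      left
      u_omega
    · left
      u_omega
    · u_omega
    · u_omega
  -- the two fields in the final memory
  have hrd_arr : rd s_10a52d.mem (F.gif + 72) 8 = s.arr := by
    rw [← rd_eq_readLE s_10a52d.mem (e.reg .rdi + 72) (F.gif + 72) 8 (by u_omega), w_mem, ha64]
    u_read
  have hrd_cnt : rd s_10a52d.mem (F.gif + 32) 4 = init.length := by
    rw [← rd_eq_readLE s_10a52d.mem (e.reg .rdi + 32) (F.gif + 32) 4 (by u_omega)]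
    exact hfcnt
  -- STEP 1 of the shape: through the callee's footprint (every window loose for the heap at the cut)
  have hcur2 : 0x700000 ≤ R.cur ∧ R.cur + 16 ≤ 0x800000 := ⟨hcur.1, hcur.2.1⟩
  have hgap : ∀ w : Span, Hc.next - 32 ≤ w.lo → Loose Hc (DGifDecreaseImageCounter.dropped F s init) R w := by
    intro w hw
    refine Or.inl ⟨?_, Or.inr (by omega), Or.inr (by omega)⟩
    intro x hx
    have hr := hinv.heap.obj_range hx
    right
    omega
  have hshape1 : Shape (DGifDecreaseImageCounter.dropped F s init) R s_10a517r.mem := by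
    refine hok.shape.sameExcept (hok.owns.placed hinv.heap) hinv.heap hcur2 hs1 ?_
    intro w hw
    simp only [List.mem_cons, List.not_mem_nil, or_false] at hw
    rcases hw with rfl | rfl | rfl | rfl | rfl | rfl | rfl
    · exact Loose.stack hinv.heap (by simp only; omega) (by simp only; omega) (by simp only; omega)
    · exact Loose.cell hinv.heap hcur2 (by simp only; omega) (by simp only; omega)
    · exact hgap _ (by simp only; omega)
    · exact Loose.shadow hinv.heap hcur.2.1 (by simp only; omega)
    · exact hgap _ (by simp only; omega)
    · exact Loose.header hinv.heap hcur2 hlca (by simp only; omega) (by simp only; omega)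
    · exact Loose.shadow hinv.heap hcur.2.1 (by simp only; omega)
  -- STEP 2: the store of the array's address, in the resized heap (`Placed` survives the resize)
  have hp1 : Placed (Hc.resize s.arr (init.length * 56)) (DGifDecreaseImageCounter.dropped F s init).owned :=
    (hok.owns.placed hinv.heap).resize _ _
  have hsv1 := dc3_saved_kept hshape1 hp1 hinv1.heap hbase1
    (w := ⟨(e.reg .rsp).toNat - 176, (e.reg .rsp).toNat - 24⟩) (by simp only; omega) hs2
  rw [hsvd] at hsv1
  obtain ⟨_, _, _, _, hslots⟩ := hsv1
  have hshapef : Shape { F with saved := some ⟨s.arr, init.length, init⟩ } R s_10a52d.mem := by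
    refine Shape.set_saved hshape1 hp1 hinv1.heap hcur2 hs2 ?_ (some ⟨s.arr, init.length, init⟩)
      ⟨hrd_arr, hrd_cnt, Nat.le_refl _, hlen, hslots⟩
    intro w hw
    simp only [List.mem_cons, List.not_mem_nil, or_false] at hw
    rcases hw with rfl | rfl
    · left
      exact Loose.stack hinv1.heap (by simp only; omega) (by simp only; omega) (by simp only; omega)
    · right
      left
      exact ⟨Nat.le_refl _, Nat.le_refl _⟩
  -- what is owned: the array with its new size, everything else as it was
  have hownf : Owns (Hc.resize s.arr (init.length * 56))
      ({ F with saved := some ⟨s.arr, init.length, init⟩ } : Forest).owned := by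
    apply hown1.perm
    rw [Nat.mul_comm init.length 56]
    exact ({ F with saved := some ⟨s.arr, init.length, init⟩ } : Forest).owned_saved.symm
  have hremf : rem R s_10a52d.mem = rem R e.mem := by
    rw [← hat.rem]
    have h1 : rem R s_10a517r.mem = rem R v.mem := by
      apply rem_sameExcept hs1 (by omega)
      intro w hw
      simp only [List.mem_cons, List.not_mem_nil, or_false] at hw
      rcases hw with rfl | rfl | rfl | rfl | rfl | rfl | rfl <;> simp only <;> omega
    have h2 : rem R s_10a52d.mem = rem R s_10a517r.mem := by
      apply rem_sameExcept hs2 (by omega)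
      intro w hw
      simp only [List.mem_cons, List.not_mem_nil, or_false] at hw
      rcases hw with rfl | rfl <;> simp only <;> omega
    exact h2.trans h1
  refine ReachVia.done ⟨Hc.resize s.arr (init.length * 56), { F with saved := some ⟨s.arr, init.length, init⟩ }, ?_⟩
  exact {
    entry := hat.entry
    pre := hat.pre
    rip := w_rip
    rsp := w_rsp
    r12 := (w_kept.get .r12 rfl).trans hat.r12
    r13 := (w_kept.get .r13 rfl).trans hat.r13
    r14 := (w_kept.get .r14 rfl).trans hat.r14
    r15 := (w_kept.get .r15 rfl).trans hat.r15
    slot_rbp := hfbp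
    slot_rbx := hfbx
    slot_ra := hfra
    region := hat.region.trans (SameRegion.resize Hc s.arr _)
    sameBut := ⟨rfl, rfl, rfl, rfl, rfl⟩
    imgs := rfl
    inv := hinvf
    ok := ⟨hownf, hshapef⟩
    rem := hremf
    same := hsamef
    code := ProgX.Base.conv_code_in w_eq
    abi := by v_inv
  }

/-- **10A4F2H … 10A531H over 10A538H, the arm `ImageCount = 0`** (`init = []`; dgif_lib.c:1166-1170): the checked load of
`gif.ImageCount` (0: `jle` taken), the checked load of `gif.SavedImages` (the array), `free` of it (the heap is `Hc.release s.arr`),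
the checked stores `gif.SavedImages = NULL`, `gif.ImageCount = 0`: `Done` for the forest `{ F with saved := none }`. -/
theorem dc3_empty (Lay : Layout) (hLay : Lay.hi = 0x1000000) (μ : Microarch) (hμ : UserX.MicroOK μ) (u₀ : State)
    (hcode : HasCodeNat Lay u₀ Gif.L.DGifDecreaseImageCounter.entry Gif.Code.code_DGifDecreaseImageCounter.nat Gif.L.DGifDecreaseImageCounter.size)
    (h_load4 : Asan.SmallCheck Lay μ ProgX.Base.WayInv (ProgX.Base.CodeOK u₀) [.rax, .rcx, .rdx] 4 ProgX.Base.L.__asan_load4_noabort.entry)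
    (h_load8 : Asan.SmallCheck Lay μ ProgX.Base.WayInv (ProgX.Base.CodeOK u₀) [.rax, .rcx, .rdx] 8 ProgX.Base.L.__asan_load8_noabort.entry)
    (h_store8 : Asan.SmallCheck Lay μ ProgX.Base.WayInv (ProgX.Base.CodeOK u₀) [.rax, .rcx, .rdx] 8 ProgX.Base.L.__asan_store8_noabort.entry)
    (h_store4 : Asan.SmallCheck Lay μ ProgX.Base.WayInv (ProgX.Base.CodeOK u₀) [.rax, .rcx, .rdx] 4 ProgX.Base.L.__asan_store4_noabort.entry)
    (H : Heap) (rest : List Obj) (frames : List (Nat × FrameLayout)) (F : Forest) (R : Rd) (g : Img)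
    (s : Saved) (Hc : Heap) (e : State) (ret : Word)
    (h_free : Calls Lay μ ProgX.Base.WayInv (ProgX.Base.conv u₀) ProgX.Base.L.free.entry
      (ProgX.Base.Spec.free.spec Hc rest frames (56 * s.cap)))
    (v : State) (hat : DGifDecreaseImageCounter.AfterMap H rest frames F R [] g s Hc u₀ e ret v) :
    ReachVia Lay μ ProgX.Base.WayInv v
      (fun w => ∃ Hc' Fc', DGifDecreaseImageCounter.Done H rest frames F R [] g Hc' Fc' u₀ e ret w) := by
  have he := hat.entry
  v_entry he
  obtain ⟨henv, hrdi, himgs, hgext⟩ := hat.pre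
  have w_rip := hat.rip
  have c_rsp : v.reg .rsp = e.reg .rsp - 24 := hat.rsp
  have c_rbx : v.reg .rbx = e.reg .rdi := hat.rbx
  have w_kept : RegsKept [.rsp] v v := RegsKept.refl _ _
  have w_eq : Mem.EqOn ProgX.Base.L.textLo ProgX.Base.L.textHi u₀.mem v.mem := ProgX.Base.conv_code_eqOn hat.code
  have hdf := (show abiInv _ from hat.abi).1
  have hmx := (show abiInv _ from hat.abi).2
  have hsse := ProgX.Base.sseOK_of_abiInv hat.abi
  have k_rbp : v.mem.readLE (e.reg .rsp - 8) 8 = (e.reg .rbp).toNat := hat.slot_rbp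
  have k_rbx : v.mem.readLE (e.reg .rsp - 16) 8 = (e.reg .rbx).toNat := hat.slot_rbx
  have k_ra : UInt64.ofNat (v.mem.readLE (e.reg .rsp) 8) = ret := hat.slot_ra
  have hsame : Mem.SameExcept
    [⟨(e.reg .rsp).toNat - 176, (e.reg .rsp).toNat⟩,
     ⟨0x800000, 0x1000020⟩] e.mem v.mem := hat.same
  have hok := hat.ok
  have hinv := hat.inv
  have hcur := henv.ctx.cursor_range henv.heap.inv.shadow
  have hbase : Hc.base = 0x800000 := hat.region.1.trans henv.heap.base
  have hlimit : Hc.limit = 0xC00000 := hat.region.2.trans henv.heap.limit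
  -- gif
  have hgin := hok.owns.inside hinv.heap (o := (F.gif, 120)) List.mem_cons_self
  simp only at hgin
  rw [hbase] at hgin
  have hg1 := hgin.1
  have hg2 := hgin.2.2.2.2
  clear hgin
  -- the array
  have hsv := hok.shape.saved
  have hsvd : (DGifDecreaseImageCounter.dropped F s []).saved = some { s with imgs := [] } := rfl
  have hgifd : (DGifDecreaseImageCounter.dropped F s []).gif = F.gif := rfl
  rw [hsvd, hgifd] at hsv
  obtain ⟨harr, hcnt, _, hcap1, _⟩ := hsv
  simp only at hcap1
  have harr' := harr
  have hcnt' := hcnt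
  simp only [gfield] at harr hcnt
  have hmem_arr : (s.arr, 56 * s.cap) ∈ (DGifDecreaseImageCounter.dropped F s []).owned := by
    apply (DGifDecreaseImageCounter.dropped F s []).owned_saved.symm.subset
    rw [hsvd]
    exact List.mem_append_left _ List.mem_cons_self
  have hain := hok.owns.inside hinv.heap hmem_arr
  simp only at hain
  rw [hbase] at hain
  have ha1 := hain.1
  have ha2 := hain.2.2.2.2
  clear hain
  have hglive : Hc.Live F.gif 120 := hok.gif_live
  have halive : Hc.Live s.arr (56 * s.cap) := hok.owns.live _ hmem_arr
  have l_cnt : v.mem.readLE (e.reg .rdi + 0x20) 4 = 0 := by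
    rw [rd_eq_readLE v.mem _ (F.gif + 32) 4 (by u_omega)]
    exact hcnt
  have l_arr : v.mem.readLE (e.reg .rdi + 0x48) 8 = s.arr := by
    rw [rd_eq_readLE v.mem _ (F.gif + 72) 8 (by u_omega)]
    exact harr
  have hgl : LiveIn (Hc.liveObjs ++ rest) frames F.gif 120 := hglive.liveIn rest frames (Nat.le_refl _) (Nat.le_refl _)
  u_walk hcode [hμ.vendor] until [Gif.L.DGifDecreaseImageCounter.ret14] span [ProgX.Base.L.textLo, ProgX.Base.L.textHi] side (v_side)
  case check_10a4f6 =>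
    -- 0x10a4f6 (dgif_lib.c:1166): the load of `gif.ImageCount` lies inside the live gif object
    have hun : ShadowUntouched v.mem s_10a4f6.mem := by v_untouched
    exact hgl.accSmall hinv.shadow hun _ 4 (by decide) (by u_omega) (by u_omega)
  case check_10a53f =>
    -- 0x10a53f (dgif_lib.c:1167): the load of `gif.SavedImages`
    have hun : ShadowUntouched v.mem s_10a53f.mem := by v_untouched
    exact hgl.accSmall hinv.shadow hun _ 8 (by decide) (by u_omega) (by u_omega)
  case call_inv =>
    v_inv
  case pre_10a548 =>
    -- 0x10a548 (dgif_lib.c:1167) `free(gif.SavedImages)`: the heap's invariant over the pushed return address; the array is live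
    have e_rsp : (s_10a548.reg .rsp).toNat + 8 = (e.reg .rsp).toNat - 24 := by
      rw [w_rsp]
      u_omega
    refine ⟨⟨?_, hbase, hlimit, henv.heap.text, henv.heap.offText⟩, Or.inr ?_⟩
    · rw [e_rsp, w_mem]
      exact hinv.writeLE_out _ _ _ (by u_omega) (by rw [hbase]; left; u_omega) (by left; u_omega)
    · rw [w_rdi, toNat_ofNat_addr s.arr (by omega)]
      exact halive
  case check_10a506 =>
    -- the arm `ImageCount > 0` is dead: the count is 0
    exact absurd (Or.inl trivial) hbr_10a500
  rotate_left 1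
  · exact absurd (Or.inl trivial) hbr_10a500
  -- 0x10a54d (ret14): `free(gif.SavedImages)` has returned: the heap is `Hc.release s.arr`
  have ha64 : (UInt64.ofNat s.arr).toNat = s.arr := toNat_ofNat_addr s.arr (by omega)
  have hne1 : (s_10a548.reg .rdi).toNat ≠ 0 := by
    rw [w_rdi_10a548, ha64]
    omega
  have hinv1 := w_post.2 hne1
  rw [w_rdi_10a548, ha64] at hinv1
  clear w_post
  have e8 : (s_10a548.reg .rsp).toNat + 8 = (e.reg .rsp).toNat - 24 := by
    rw [w_rsp_10a548]
    u_omega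
  rw [e8] at hinv1
  v_after_call w_rsp_10a548 w_mem_10a548
  simp only [shadowSpan, w_rdi_10a548, ha64] at w_same
  have hpbp : s_10a548.mem.readLE (e.reg .rsp - 8) 8 = (e.reg .rbp).toNat := by
    rw [w_mem_10a548]
    u_frame k_rbp
  rw [w_mem_10a548] at hpbp
  have hsbp : s_10a548r.mem.readLE (e.reg .rsp - 8) 8 = (e.reg .rbp).toNat := by u_frame hpbp
  have hpbx : s_10a548.mem.readLE (e.reg .rsp - 16) 8 = (e.reg .rbx).toNat := by
    rw [w_mem_10a548]
    u_frame k_rbx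
  rw [w_mem_10a548] at hpbx
  have hsbx : s_10a548r.mem.readLE (e.reg .rsp - 16) 8 = (e.reg .rbx).toNat := by u_frame hpbx
  have hpra : UInt64.ofNat (s_10a548.mem.readLE (e.reg .rsp) 8) = ret := by
    rw [w_mem_10a548]
    u_frame k_ra
  rw [w_mem_10a548] at hpra
  have hsra : UInt64.ofNat (s_10a548r.mem.readLE (e.reg .rsp) 8) = ret := by u_frame hpra
  have hs1 : Mem.SameExcept
    [⟨(e.reg .rsp).toNat - 176, (e.reg .rsp).toNat - 24⟩,
     ⟨s.arr - 24, s.arr - 16⟩,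
     ⟨0xC00000 + s.arr / 8, 0xC00000 + (s.arr + 56 * s.cap + 7) / 8⟩] v.mem s_10a548r.mem := by u_same
  -- what is owned after the `free`: the forest but the array; gif is still live
  have hperm : (DGifDecreaseImageCounter.dropped F s []).owned.Perm ((s.arr, 56 * s.cap) :: F.ownedButSaved) :=
    (DGifDecreaseImageCounter.dropped F s []).owned_saved
  have hown0 := hok.owns.perm hperm
  have hgne : s.arr ≠ F.gif := hown0.of_cons.2.2 (F.gif, 120) List.mem_cons_self
  have hown1 : Owns (Hc.release s.arr) F.ownedButSaved := hown0.release_head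
  have hglive1 : (Hc.release s.arr).Live F.gif 120 := hglive.release_ne (Ne.symm hgne)
  have hgl1 : LiveIn ((Hc.release s.arr).liveObjs ++ rest) frames F.gif 120 :=
    hglive1.liveIn rest frames (Nat.le_refl _) (Nat.le_refl _)
  u_walk hcode [hμ.vendor] until [Gif.L.DGifDecreaseImageCounter.at_10a531] span [ProgX.Base.L.textLo, ProgX.Base.L.textHi] side (v_side)
  case check_10a550 =>
    -- 0x10a550 (dgif_lib.c:1168): the store of NULL to `gif.SavedImages`: gif is live in the heap after the `free`
    have hun : ShadowUntouched s_10a548r.mem s_10a550.mem := by v_untouched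
    exact hgl1.accSmall hinv1.shadow hun _ 8 (by decide) (by u_omega) (by u_omega)
  case check_10a561 =>
    -- 0x10a561 (dgif_lib.c:1169): the store of 0 to `gif.ImageCount`
    have hun : ShadowUntouched s_10a548r.mem s_10a561.mem := by v_untouched
    exact hgl1.accSmall hinv1.shadow hun _ 4 (by decide) (by u_omega) (by u_omega)
  -- 0x10a531 (CUT 3, dgif_lib.c:1179): THE EXIT ASSERTION, for the heap after the `free` and the forest without the array
  clear he_align
  have hbase1 : (Hc.release s.arr).base = 0x800000 := hbase
  -- the slots through the two pushed return addresses and the two stores into gif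
  have hfbp : s_10a56d.mem.readLE (e.reg .rsp - 8) 8 = (e.reg .rbp).toNat := by
    rw [w_mem]
    u_frame hsbp
  have hfbx : s_10a56d.mem.readLE (e.reg .rsp - 16) 8 = (e.reg .rbx).toNat := by
    rw [w_mem]
    u_frame hsbx
  have hfra : UInt64.ofNat (s_10a56d.mem.readLE (e.reg .rsp) 8) = ret := by
    rw [w_mem]
    u_frame hsra
  -- the footprint since the segment's entry
  have hs2 : Mem.SameExcept
    [⟨(e.reg .rsp).toNat - 176, (e.reg .rsp).toNat - 24⟩,
     ⟨s.arr - 24, s.arr - 16⟩,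
     ⟨0xC00000 + s.arr / 8, 0xC00000 + (s.arr + 56 * s.cap + 7) / 8⟩,
     ⟨F.gif + 72, F.gif + 80⟩,
     ⟨F.gif + 32, F.gif + 36⟩] v.mem s_10a56d.mem := by
    rw [w_mem]
    u_same
  have hsamef : Mem.SameExcept
    [⟨(e.reg .rsp).toNat - 176, (e.reg .rsp).toNat⟩,
     ⟨0x800000, 0x1000020⟩] e.mem s_10a56d.mem := by
    rw [w_mem]
    u_same
  -- the heap's invariant: two return addresses on the stack, two stores into the live gif
  have hinvf : HeapInv (Hc.release s.arr) rest frames ((e.reg .rsp).toNat - 24) s_10a56d.mem := by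
    rw [w_mem]
    refine (((hinv1.writeLE_out _ _ _ ?_ ?_ ?_).writeLE_live hglive1 _ _ _ ?_ ?_).writeLE_out _ _ _ ?_ ?_ ?_).writeLE_live
      hglive1 _ _ _ ?_ ?_
    · u_omega
    · rw [hbase1]
      left
      u_omega
    · left
      u_omega
    · u_omega
    · u_omega
    · u_omega
    · rw [hbase1]
      left
      u_omega
    · left
      u_omega
    · u_omega
    · u_omega
  -- the two fields read back
  have hrd_arr : rd s_10a56d.mem (F.gif + 72) 8 = 0 := by
    rw [← rd_eq_readLE s_10a56d.mem (e.reg .rdi + 72) (F.gif + 72) 8 (by u_omega), w_mem]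
    u_read
  have hrd_cnt : rd s_10a56d.mem (F.gif + 32) 4 = 0 := by
    rw [← rd_eq_readLE s_10a56d.mem (e.reg .rdi + 32) (F.gif + 32) 4 (by u_omega), w_mem]
    u_read
  -- the shape: `Shape.set_saved` over the footprint since the cut (the `free`'s windows are loose, the two stores are the
  -- fields of the array), for the component `saved := none`
  obtain ⟨ca, hlca⟩ := halive
  have hshape : Shape { F with saved := none } R s_10a56d.mem := by
    refine Shape.set_saved hok.shape (hok.owns.placed hinv.heap) hinv.heap ⟨hcur.1, hcur.2.1⟩ hs2 ?_ none ⟨hrd_arr, hrd_cnt⟩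
    intro w hw
    simp only [List.mem_cons, List.not_mem_nil, or_false] at hw
    rcases hw with rfl | rfl | rfl | rfl | rfl
    · left
      exact Loose.stack hinv.heap (by simp only; omega) (by simp only; omega) (by simp only; omega)
    · left
      exact Loose.header hinv.heap ⟨hcur.1, hcur.2.1⟩ hlca (by simp only; omega) (by simp only; omega)
    · left
      exact Loose.shadow hinv.heap hcur.2.1 (by simp only; omega)
    · right
      left
      exact ⟨Nat.le_refl _, Nat.le_refl _⟩
    · right
      right
      left
      exact ⟨Nat.le_refl _, Nat.le_refl _⟩
  -- what is owned: the forest but the array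
  have hownf : Owns (Hc.release s.arr) ({ F with saved := none } : Forest).owned :=
    hown1.perm ({ F with saved := none } : Forest).owned_saved.symm
  have hremf : rem R s_10a56d.mem = rem R e.mem := by
    rw [← hat.rem]
    apply rem_sameExcept hs2 (by omega)
    intro w hw
    simp only [List.mem_cons, List.not_mem_nil, or_false] at hw
    rcases hw with rfl | rfl | rfl | rfl | rfl <;> simp only <;> omega
  refine ReachVia.done ⟨Hc.release s.arr, { F with saved := none }, ?_⟩
  exact {
    entry := hat.entry
    pre := hat.pre
    rip := w_rip
    rsp := w_rsp
    r12 := (w_kept.get .r12 rfl).trans hat.r12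
    r13 := (w_kept.get .r13 rfl).trans hat.r13
    r14 := (w_kept.get .r14 rfl).trans hat.r14
    r15 := (w_kept.get .r15 rfl).trans hat.r15
    slot_rbp := hfbp
    slot_rbx := hfbx
    slot_ra := hfra
    region := hat.region.trans (SameRegion.release Hc s.arr)
    sameBut := ⟨rfl, rfl, rfl, rfl, rfl⟩
    imgs := rfl
    inv := hinvf
    ok := ⟨hownf, hshape⟩
    rem := hremf
    same := hsamef
    code := ProgX.Base.conv_code_in w_eq
    abi := by v_inv
  }

end Gif.Spec.DGifDecreaseImageCounter_3
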